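-- pv_equiv track=rewrite | github.com/Wilsong1230/ControlPointExtractor | old/camelot_extract.py | find_point_col
-- ===== SOURCE A (Python) =====
-- def find_point_col(cols):
--     for c in cols:
--         u = c.upper()
--         if "POINT" in u and ("NO" in u or "NUMBER" in u):
--             return c
--     for c in cols:
--         if "POINT" in c.upper():
--             return c
--     return cols[0] if cols else None
-- ===== SOURCE B (Python) =====
-- def find_point_col(cols):
--     best = None
--     for c in cols:
--         u = c.upper()
--         if "POINT" in u:
--             if "NO" in u or "NUMBER" in u:
--                 return c
--             if best is None:
--                 best = c
--     if best is not None: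
--         return best
--     return cols[0] if cols else None
-- ===== Notes on version B (the rewrite author's own statement) =====
-- stated objective: alternative
-- what changed: Replaces A's two sequential scans (priority match, then point-only match) by a single pass that returns a priority match immediately and merely remembers the first point-only candidate in an accumulator.
import Mathlib
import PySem

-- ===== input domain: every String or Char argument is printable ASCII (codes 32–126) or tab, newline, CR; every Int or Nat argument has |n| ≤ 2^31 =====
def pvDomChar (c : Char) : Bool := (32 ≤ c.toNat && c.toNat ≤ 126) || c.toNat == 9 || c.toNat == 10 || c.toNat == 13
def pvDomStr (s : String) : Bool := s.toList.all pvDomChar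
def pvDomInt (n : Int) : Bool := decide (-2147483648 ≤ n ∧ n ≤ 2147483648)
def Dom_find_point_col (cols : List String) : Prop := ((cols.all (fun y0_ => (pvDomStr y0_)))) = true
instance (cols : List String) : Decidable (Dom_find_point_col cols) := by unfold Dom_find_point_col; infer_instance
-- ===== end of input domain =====

-- B replaces A's two sequential scans by a single pass that remembers the first point-only candidate (objective: alternative decomposition).

-- ===== PORT A =====
-- first loop of A: first c with "POINT" in u and ("NO" in u or "NUMBER" in u)
def pvALoop1 : List String → Option String
  | [] => none
  | c :: rest =>
    let u := PySem.Str.upper c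
    if PySem.Str.isIn "POINT" u && (PySem.Str.isIn "NO" u || PySem.Str.isIn "NUMBER" u) then some c
    else pvALoop1 rest

-- second loop of A: first c with "POINT" in c.upper()
def pvALoop2 : List String → Option String
  | [] => none
  | c :: rest =>
    if PySem.Str.isIn "POINT" (PySem.Str.upper c) then some c
    else pvALoop2 rest

def find_point_col (cols : List String) : Option String :=
  match pvALoop1 cols with
  | some c => some c
  | none =>
    match pvALoop2 cols with
    | some c => some c
    | none => cols.head?   -- cols[0] if cols else None

-- ===== PORT B =====
-- single pass: return a priority match at once, remember the first point-only candidate in `best`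
def pvBLoop (best : Option String) : List String → Option String
  | [] => best
  | c :: rest =>
    let u := PySem.Str.upper c
    if PySem.Str.isIn "POINT" u then
      if PySem.Str.isIn "NO" u || PySem.Str.isIn "NUMBER" u then some c
      else if best.isNone then pvBLoop (some c) rest
      else pvBLoop best rest
    else pvBLoop best rest

def find_point_col_alt (cols : List String) : Option String :=
  match pvBLoop none cols with
  | some b => some b
  | none => cols.head?   -- cols[0] if cols else None

-- ===== PRECONDITION & SPEC =====
def Spec_find_point_col (cols : List String) (out : Option String) : Prop := out = find_point_col_alt cols
instance (cols : List String) (out : Option String) : Decidable (Spec_find_point_col cols out) := by unfold Spec_find_point_col; infer_instance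

-- ===== CLAIM (what is proved, stated in full; the proofs are below) =====
def Claim_equal_find_point_col : Prop := ∀ (cols : List String), Dom_find_point_col cols → Spec_find_point_col cols (find_point_col cols)

-- ===== LEMMAS AND PROOFS =====
theorem pvBLoop_char (best : Option String) (cols : List String) :
    pvBLoop best cols =
      match pvALoop1 cols with
      | some c => some c
      | none => match best with
                | some b => some b
                | none => pvALoop2 cols := by
  induction cols generalizing best with
  | nil => cases best <;> simp [pvBLoop, pvALoop1, pvALoop2]
  | cons c rest ih =>
    simp only [pvBLoop, pvALoop1, pvALoop2]
    cases hp : PySem.Chars.isIn ['P','O','I','N','T'] (PySem.Chars.upper c.toList) <;>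
      cases hn : PySem.Chars.isIn ['N','O'] (PySem.Chars.upper c.toList) <;>
        cases hm : PySem.Chars.isIn ['N','U','M','B','E','R'] (PySem.Chars.upper c.toList) <;>
          cases best <;>
            simp [hp, hn, hm, ih]

-- ===== VERDICT (by name: the statement is the Claim_ definition above) =====
theorem find_point_col_spec : Claim_equal_find_point_col := by
  intro cols _
  unfold Spec_find_point_col find_point_col find_point_col_alt
  rw [pvBLoop_char]
  cases pvALoop1 cols <;> cases pvALoop2 cols <;> simp
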